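-- pv_equiv track=rewrite | github.com/mattdinhnguyen/algos | canReverseToMatch.py | are_they_equal
-- ===== SOURCE A (Python) =====
-- def are_they_equal(array_a, array_b):
--     visited = set()
--
--     for i in range(len(array_a)-1): # N**2
--         for j in range(i+1, len(array_a)):
--             a2 = array_b[:]
--             a2[i:j+1] = array_b[i:j+1][::-1]
--             if tuple(a2) in visited:
--                 continue
--             elif a2 == array_a:
--                 return True
--             else:
--                 visited.add(tuple(a2))
--
--     return False
-- ===== SOURCE B (Python) =====
-- def are_they_equal(array_a, array_b):
--     # O(n): locate the first and last mismatching positions and verify that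
--     # the mismatching window of array_b, reversed, matches array_a there.
--     if len(array_a) != len(array_b):
--         return False
--     n = len(array_a)
--     i = 0
--     while i < n and array_a[i] == array_b[i]:
--         i += 1
--     if i == n:
--         # arrays are equal: a reversal leaving the array unchanged exists
--         # iff some adjacent pair or gap-2 pair of equal values exists
--         return any(array_b[k] == array_b[k + 1] for k in range(n - 1)) or \
--                any(array_b[k] == array_b[k + 2] for k in range(n - 2))
--     j = n - 1
--     while array_a[j] == array_b[j]:
--         j -= 1
--     return array_a[i:j + 1] == array_b[i:j + 1][::-1]
-- ===== Notes on version B (the rewrite author's own statement) =====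
-- stated objective: faster
-- what changed: Replaces A's brute-force enumeration of all O(n^2) subarray reversals (each built and compared in O(n), with a memo set) by an O(n) scan: find the first and last mismatching positions and check that window of array_b reversed matches array_a, with a length-2/3 palindromic-core test when the arrays are equal.
import Mathlib
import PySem

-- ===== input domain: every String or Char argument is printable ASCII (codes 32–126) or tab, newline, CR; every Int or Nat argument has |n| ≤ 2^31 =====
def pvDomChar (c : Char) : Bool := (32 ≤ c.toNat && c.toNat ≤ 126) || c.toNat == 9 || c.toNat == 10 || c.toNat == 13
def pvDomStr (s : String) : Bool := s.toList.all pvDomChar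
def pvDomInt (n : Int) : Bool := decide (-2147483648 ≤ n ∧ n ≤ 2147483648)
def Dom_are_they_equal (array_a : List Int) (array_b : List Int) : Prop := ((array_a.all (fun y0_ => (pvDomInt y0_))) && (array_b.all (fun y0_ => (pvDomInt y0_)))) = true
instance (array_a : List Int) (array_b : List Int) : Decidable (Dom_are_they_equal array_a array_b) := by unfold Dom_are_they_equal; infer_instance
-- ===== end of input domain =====

-- B replaces A's brute-force try-every-reversal search (O(n^3)) by an O(n) first/last-mismatch
-- window check; faster (asymptotic), same return value on every input.

-- ===== PORT A =====
-- Python slice assignment l[lo:hi] = x (clamped bounds, as Python clamps slice-assignment bounds)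
def pySetSlice (l : List Int) (lo hi : Int) (x : List Int) : List Int :=
  l.take (PySem.List.clampIdx l.length lo) ++ x ++ l.drop (PySem.List.clampIdx l.length hi)

-- a2 = array_b[:]; a2[i:j+1] = array_b[i:j+1][::-1]   ([::-1] ported as .reverse, cf. PySem.List.slice?_none_none_neg_one)
def mkA2 (array_b : List Int) (i j : Int) : List Int :=
  pySetSlice array_b i (j + 1) ((PySem.List.slice array_b (some i) (some (j + 1))).reverse)

-- inner 'for j in range(i+1, len(array_a))' loop; returns (early-return flag, visited)
def aInner (array_a array_b : List Int) (i : Int) :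
    List Int → PySem.Set (List Int) → Bool × PySem.Set (List Int)
  | [], visited => (false, visited)
  | j :: js, visited =>
    let a2 := mkA2 array_b i j
    if PySem.Set.contains visited a2 then aInner array_a array_b i js visited
    else if a2 = array_a then (true, visited)
    else aInner array_a array_b i js (PySem.Set.add visited a2)

-- outer 'for i in range(len(array_a)-1)' loop
def aOuter (array_a array_b : List Int) : List Int → PySem.Set (List Int) → Bool
  | [], _ => false
  | i :: is, visited =>
    let r := aInner array_a array_b i (PySem.List.pyRange (i + 1) (array_a.length : Int) 1) visited
    if r.1 then true else aOuter array_a array_b is r.2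

def are_they_equal (array_a : List Int) (array_b : List Int) : Bool :=
  aOuter array_a array_b (PySem.List.pyRange 0 ((array_a.length : Int) - 1) 1) PySem.Set.empty

-- ===== PORT B =====
-- 'i = 0; while i < n and array_a[i] == array_b[i]: i += 1'
def bFirst (a b : List Int) (n i : Int) : Int :=
  if i < n ∧ PySem.List.pyGetD a i 0 = PySem.List.pyGetD b i 0 then bFirst a b n (i + 1) else i
termination_by (n - i).toNat
decreasing_by omega

-- 'j = n - 1; while array_a[j] == array_b[j]: j -= 1'  (the 0 ≤ j guard only makes the
-- recursion total; when called, a mismatch at an index ≤ j exists so it never fires)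
def bLast (a b : List Int) (j : Int) : Int :=
  if 0 ≤ j ∧ PySem.List.pyGetD a j 0 = PySem.List.pyGetD b j 0 then bLast a b (j - 1) else j
termination_by (j + 1).toNat
decreasing_by omega

def are_they_equal_alt (array_a : List Int) (array_b : List Int) : Bool :=
  if array_a.length ≠ array_b.length then false
  else
    let n : Int := array_a.length
    let i := bFirst array_a array_b n 0
    if i = n then
      ((PySem.List.pyRange 0 (n - 1) 1).any fun k =>
          PySem.List.pyGetD array_b k 0 == PySem.List.pyGetD array_b (k + 1) 0) ||
      ((PySem.List.pyRange 0 (n - 2) 1).any fun k =>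
          PySem.List.pyGetD array_b k 0 == PySem.List.pyGetD array_b (k + 2) 0)
    else
      let j := bLast array_a array_b (n - 1)
      decide (PySem.List.slice array_a (some i) (some (j + 1)) =
        (PySem.List.slice array_b (some i) (some (j + 1))).reverse)

-- ===== PRECONDITION & SPEC =====
def Spec_are_they_equal (array_a : List Int) (array_b : List Int) (out : Bool) : Prop := out = are_they_equal_alt array_a array_b
instance (array_a : List Int) (array_b : List Int) (out : Bool) : Decidable (Spec_are_they_equal array_a array_b out) := by unfold Spec_are_they_equal; infer_instance

-- ===== CLAIM (what is proved, stated in full; the proofs are below) =====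
def Claim_equal_are_they_equal : Prop := ∀ (array_a : List Int) (array_b : List Int), Dom_are_they_equal array_a array_b → Spec_are_they_equal array_a array_b (are_they_equal array_a array_b)

-- ===== LEMMAS AND PROOFS =====

-- 'array_a is array_b with the subarray [p,q] reversed', stated pointwise
def RevAt (a b : List Int) (p q : Nat) : Prop :=
  b.length = a.length ∧ p < q ∧ q < a.length ∧
    ∀ k, k < a.length → a.getD k 0 = b.getD (if p ≤ k ∧ k ≤ q then p + q - k else k) 0

lemma mkA2_natCast (b : List Int) (p q : Nat) (hpq : p ≤ q) (hq : q < b.length) :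
    mkA2 b (p : Int) (q : Int) =
      b.take p ++ ((b.drop p).take (q + 1 - p)).reverse ++ b.drop (q + 1) := by
  unfold mkA2 pySetSlice
  have h1 : ((q : Int) + 1) = ((q + 1 : Nat) : Int) := by push_cast; ring
  rw [h1, PySem.List.slice_natCast, PySem.List.clampIdx_natCast, PySem.List.clampIdx_natCast]
  have h2 : min p b.length = p := by omega
  have h3 : min (q + 1) b.length = q + 1 := by omega
  rw [h2, h3]

lemma length_mkA2 (b : List Int) (i j : Int) (h0 : 0 ≤ i) (hij : i ≤ j) :
    (mkA2 b i j).length = b.length := by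
  have hi : i = ((i.toNat : Nat) : Int) := (Int.toNat_of_nonneg h0).symm
  have hj : j + 1 = ((j.toNat + 1 : Nat) : Int) := by omega
  have hle : i.toNat ≤ j.toNat + 1 := by omega
  unfold mkA2 pySetSlice
  rw [hi, hj]
  simp only [List.length_append, List.length_take, List.length_drop, List.length_reverse,
    PySem.List.length_slice, PySem.List.clampIdx_natCast]
  omega

lemma mkA2_getD (b : List Int) (p q k : Nat) (hpq : p ≤ q) (hq : q < b.length) :
    (mkA2 b (p : Int) (q : Int)).getD k 0
      = b.getD (if p ≤ k ∧ k ≤ q then p + q - k else k) 0 := by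
  rw [mkA2_natCast b p q hpq hq, List.append_assoc]
  rw [List.getD_eq_getElem?_getD, List.getD_eq_getElem?_getD]
  have hlt : (b.take p).length = p := by simp; omega
  have hlm : ((b.drop p).take (q + 1 - p)).length = q + 1 - p := by simp; omega
  by_cases h1 : k < p
  · rw [List.getElem?_append_left (by rw [hlt]; omega)]
    rw [List.getElem?_take, if_pos h1]
    rw [if_neg (by omega)]
  · push_neg at h1
    rw [List.getElem?_append_right (by rw [hlt]; omega), hlt]
    by_cases h2 : k ≤ q
    · rw [List.getElem?_append_left (by rw [List.length_reverse, hlm]; omega)]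
      rw [List.getElem?_reverse (by rw [hlm]; omega), hlm]
      rw [List.getElem?_take, if_pos (by omega), List.getElem?_drop]
      rw [if_pos ⟨h1, h2⟩]
      rw [show p + (q + 1 - p - 1 - (k - p)) = p + q - k from by omega]
    · push_neg at h2
      rw [List.getElem?_append_right (by rw [List.length_reverse, hlm]; omega)]
      rw [List.length_reverse, hlm, List.getElem?_drop]
      rw [if_neg (by omega)]
      rw [show q + 1 + (k - p - (q + 1 - p)) = k from by omega]

lemma mkA2_eq_iff (a b : List Int) (p q : Nat) (hpq : p < q) (hq : q < a.length)
    (hlen : b.length = a.length) :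
    (mkA2 b (p : Int) (q : Int) = a)
      ↔ ∀ k, k < a.length → a.getD k 0 = b.getD (if p ≤ k ∧ k ≤ q then p + q - k else k) 0 := by
  have hq' : q < b.length := by omega
  constructor
  · intro h k hk
    have h2 := congrArg (fun l => l.getD k 0) h
    simp only at h2
    rw [mkA2_getD b p q k hpq.le hq'] at h2
    exact h2.symm
  · intro h
    have hlen2 : (mkA2 b (p : Int) (q : Int)).length = a.length := by
      rw [length_mkA2 b (p : Int) (q : Int) (Int.natCast_nonneg p) (by exact_mod_cast hpq.le)]
      exact hlen
    apply List.ext_getElem hlen2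
    intro i hi1 hi2
    have e1 : (mkA2 b (p : Int) (q : Int)).getD i 0 = a.getD i 0 := by
      rw [mkA2_getD b p q i hpq.le hq', ← h i hi2]
    rw [List.getD_eq_getElem _ _ hi1, List.getD_eq_getElem _ _ hi2] at e1
    exact e1

lemma aInner_spec (a b : List Int) (i : Int) (js : List Int) :
    ∀ (v : PySem.Set (List Int)), (∀ x ∈ v, x ≠ a) →
      (((aInner a b i js v).1 = true) ↔ ∃ j ∈ js, mkA2 b i j = a) ∧
      (∀ x ∈ (aInner a b i js v).2, x ≠ a) := by
  induction js with
  | nil =>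
    intro v hv
    exact ⟨by simp [aInner], by simpa [aInner] using hv⟩
  | cons j js ih =>
    intro v hv
    have hstep : aInner a b i (j :: js) v =
        (if PySem.Set.contains v (mkA2 b i j) then aInner a b i js v
         else if mkA2 b i j = a then (true, v)
         else aInner a b i js (PySem.Set.add v (mkA2 b i j))) := rfl
    by_cases hc : PySem.Set.contains v (mkA2 b i j) = true
    · have hne : mkA2 b i j ≠ a := hv _ ((PySem.Set.contains_iff v _).1 hc)
      rw [hstep, if_pos hc]
      obtain ⟨h1, h2⟩ := ih v hv
      refine ⟨?_, h2⟩
      rw [h1]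
      simp only [List.mem_cons]
      constructor
      · rintro ⟨x, hx, he⟩; exact ⟨x, Or.inr hx, he⟩
      · rintro ⟨x, hx | hx, he⟩
        · exact absurd he (hx ▸ hne)
        · exact ⟨x, hx, he⟩
    · by_cases heq : mkA2 b i j = a
      · rw [hstep, if_neg hc, if_pos heq]
        exact ⟨⟨fun _ => ⟨j, by simp, heq⟩, fun _ => rfl⟩, hv⟩
      · rw [hstep, if_neg hc, if_neg heq]
        have hv' : ∀ x ∈ PySem.Set.add v (mkA2 b i j), x ≠ a := by
          intro x hx
          rcases (PySem.Set.mem_add v _ x).1 hx with h | h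
          · exact hv x h
          · rw [h]; exact heq
        obtain ⟨h1, h2⟩ := ih _ hv'
        refine ⟨?_, h2⟩
        rw [h1]
        simp only [List.mem_cons]
        constructor
        · rintro ⟨x, hx, he⟩; exact ⟨x, Or.inr hx, he⟩
        · rintro ⟨x, hx | hx, he⟩
          · exact absurd he (hx ▸ heq)
          · exact ⟨x, hx, he⟩

lemma aOuter_spec (a b : List Int) (is : List Int) :
    ∀ (v : PySem.Set (List Int)), (∀ x ∈ v, x ≠ a) →
      (aOuter a b is v = true
        ↔ ∃ i ∈ is, ∃ j ∈ PySem.List.pyRange (i + 1) (a.length : Int) 1, mkA2 b i j = a) := by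
  induction is with
  | nil => intro v hv; simp [aOuter]
  | cons i is ih =>
    intro v hv
    obtain ⟨h1, h2⟩ := aInner_spec a b i (PySem.List.pyRange (i + 1) (a.length : Int) 1) v hv
    have hstep : aOuter a b (i :: is) v =
        (if (aInner a b i (PySem.List.pyRange (i + 1) (a.length : Int) 1) v).1 then true
         else aOuter a b is (aInner a b i (PySem.List.pyRange (i + 1) (a.length : Int) 1) v).2) := rfl
    by_cases hr : (aInner a b i (PySem.List.pyRange (i + 1) (a.length : Int) 1) v).1 = true
    · rw [hstep, if_pos hr]
      simp only [List.mem_cons, true_iff]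
      obtain ⟨j, hj, he⟩ := h1.1 hr
      exact ⟨i, Or.inl rfl, j, hj, he⟩
    · rw [hstep, if_neg hr, ih _ h2]
      simp only [List.mem_cons]
      constructor
      · rintro ⟨x, hx, hj⟩; exact ⟨x, Or.inr hx, hj⟩
      · rintro ⟨x, hx | hx, hj⟩
        · exact absurd (h1.2 (hx ▸ hj)) hr
        · exact ⟨x, hx, hj⟩

lemma pyget_eq (x : List Int) (i : Int) (h0 : 0 ≤ i) :
    PySem.List.pyGetD x i 0 = x.getD i.toNat 0 :=
  PySem.List.pyGetD_of_nonneg x 0 h0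

lemma bFirst_spec (a b : List Int) (n : Int) :
    ∀ (d : Nat) (i : Int), (n - i).toNat ≤ d → 0 ≤ i → i ≤ n →
      i ≤ bFirst a b n i ∧ bFirst a b n i ≤ n ∧
      (∀ m : Int, i ≤ m → m < bFirst a b n i →
        PySem.List.pyGetD a m 0 = PySem.List.pyGetD b m 0) ∧
      (bFirst a b n i = n ∨
        PySem.List.pyGetD a (bFirst a b n i) 0 ≠ PySem.List.pyGetD b (bFirst a b n i) 0) := by
  intro d
  induction d with
  | zero =>
    intro i hd h0 hn
    have hin : i = n := by omega
    rw [bFirst, if_neg (by omega)]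
    exact ⟨le_refl _, hn, fun m h1 h2 => by omega, Or.inl hin⟩
  | succ d ih =>
    intro i hd h0 hn
    rw [bFirst]
    by_cases hc : i < n ∧ PySem.List.pyGetD a i 0 = PySem.List.pyGetD b i 0
    · rw [if_pos hc]
      obtain ⟨h1, h2, h3, h4⟩ := ih (i + 1) (by omega) (by omega) (by omega)
      refine ⟨by omega, h2, ?_, h4⟩
      intro m hm1 hm2
      rcases eq_or_lt_of_le hm1 with he | hlt
      · rw [← he]; exact hc.2
      · exact h3 m (by omega) hm2
    · rw [if_neg hc]
      refine ⟨le_refl _, hn, fun m h1 h2 => by omega, ?_⟩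
      by_cases hin : i = n
      · exact Or.inl hin
      · right
        intro he
        exact hc ⟨by omega, he⟩

lemma bLast_spec (a b : List Int) :
    ∀ (d : Nat) (j : Int), (j + 1).toNat ≤ d →
      (∃ m : Int, 0 ≤ m ∧ m ≤ j ∧ PySem.List.pyGetD a m 0 ≠ PySem.List.pyGetD b m 0) →
      0 ≤ bLast a b j ∧ bLast a b j ≤ j ∧
      PySem.List.pyGetD a (bLast a b j) 0 ≠ PySem.List.pyGetD b (bLast a b j) 0 ∧
      (∀ m : Int, bLast a b j < m → m ≤ j →
        PySem.List.pyGetD a m 0 = PySem.List.pyGetD b m 0) := by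
  intro d
  induction d with
  | zero =>
    rintro j hd ⟨m, h1, h2, h3⟩
    omega
  | succ d ih =>
    rintro j hd ⟨m, h1, h2, h3⟩
    rw [bLast]
    by_cases hc : 0 ≤ j ∧ PySem.List.pyGetD a j 0 = PySem.List.pyGetD b j 0
    · rw [if_pos hc]
      have hmj : m ≠ j := by intro he; exact h3 (he ▸ hc.2)
      obtain ⟨g1, g2, g3, g4⟩ := ih (j - 1) (by omega) ⟨m, h1, by omega, h3⟩
      refine ⟨g1, by omega, g3, ?_⟩
      intro m' hm1 hm2
      rcases eq_or_lt_of_le hm2 with he | hlt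
      · rw [he]; exact hc.2
      · exact g4 m' hm1 (by omega)
    · rw [if_neg hc]
      have hj0 : 0 ≤ j := by omega
      have hne : PySem.List.pyGetD a j 0 ≠ PySem.List.pyGetD b j 0 := by
        intro he; exact hc ⟨hj0, he⟩
      exact ⟨hj0, le_refl _, hne, fun m' h1 h2 => by omega⟩

lemma slice_rev_iff (a b : List Int) (p q : Nat) (hlen : b.length = a.length)
    (hpq : p ≤ q) (hq : q < a.length) :
    (PySem.List.slice a (some (p : Int)) (some ((q : Int) + 1))
       = (PySem.List.slice b (some (p : Int)) (some ((q : Int) + 1))).reverse)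
    ↔ ∀ k, p ≤ k → k ≤ q → a.getD k 0 = b.getD (p + q - k) 0 := by
  have hc : ((q : Int) + 1) = ((q + 1 : Nat) : Int) := by push_cast; ring
  rw [hc, PySem.List.slice_natCast, PySem.List.slice_natCast]
  have hla : (List.take (q + 1 - p) (List.drop p a)).length = q + 1 - p := by simp; omega
  have hlb : (List.take (q + 1 - p) (List.drop p b)).length = q + 1 - p := by simp; omega
  constructor
  · intro h k hk1 hk2
    have h2 := congrArg (fun l => l.getD (k - p) 0) h
    simp only at h2
    rw [List.getD_eq_getElem?_getD, List.getD_eq_getElem?_getD] at h2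
    rw [List.getElem?_take, if_pos (by omega), List.getElem?_drop] at h2
    rw [List.getElem?_reverse (by rw [hlb]; omega), hlb] at h2
    rw [List.getElem?_take, if_pos (by omega), List.getElem?_drop] at h2
    rw [show p + (k - p) = k from by omega] at h2
    rw [show p + (q + 1 - p - 1 - (k - p)) = p + q - k from by omega] at h2
    rw [List.getD_eq_getElem?_getD, List.getD_eq_getElem?_getD]
    exact h2
  · intro h
    apply List.ext_getElem (by rw [List.length_reverse, hla, hlb])
    intro m hma hmb
    have hm : m < q + 1 - p := by rw [hla] at hma; exact hma
    have hg : (List.take (q + 1 - p) (List.drop p a)).getD m 0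
        = ((List.take (q + 1 - p) (List.drop p b)).reverse).getD m 0 := by
      rw [List.getD_eq_getElem?_getD, List.getD_eq_getElem?_getD]
      rw [List.getElem?_take, if_pos (by omega), List.getElem?_drop]
      rw [List.getElem?_reverse (by rw [hlb]; omega), hlb]
      rw [List.getElem?_take, if_pos (by omega), List.getElem?_drop]
      have e := h (p + m) (by omega) (by omega)
      rw [List.getD_eq_getElem?_getD, List.getD_eq_getElem?_getD] at e
      rw [show p + (q + 1 - p - 1 - m) = p + q - (p + m) from by omega]
      exact e
    rw [List.getD_eq_getElem _ _ hma, List.getD_eq_getElem _ _ hmb] at hg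
    exact hg

-- the crux: if ANY reversal of b[p..q] yields a, then reversing the minimal
-- mismatch window [i,j] does too (strong induction shrinking [p,q] symmetrically)
lemma core (a b : List Int) (i j : Nat) (hilen : i < a.length) (hjlen : j < a.length)
    (hfd : ∀ m, m < i → a.getD m 0 = b.getD m 0) (hdi : a.getD i 0 ≠ b.getD i 0)
    (hld : ∀ m, j < m → m < a.length → a.getD m 0 = b.getD m 0)
    (hdj : a.getD j 0 ≠ b.getD j 0) :
    ∀ (d p q : Nat), q - p ≤ d → p < q → q < a.length →
      (∀ k, k < a.length → a.getD k 0 = b.getD (if p ≤ k ∧ k ≤ q then p + q - k else k) 0) →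
      ∀ k, i ≤ k → k ≤ j → a.getD k 0 = b.getD (i + j - k) 0 := by
  intro d
  induction d with
  | zero => intro p q hd hpq; omega
  | succ d ih =>
    intro p q hd hpq hq hrev
    have hpi : p ≤ i := by
      by_contra hlt
      push_neg at hlt
      have h := hrev i hilen
      rw [if_neg (by omega)] at h
      exact hdi h
    have hij : i ≤ j := by
      by_contra h
      push_neg at h
      exact hdj (hfd j (by omega))
    have hjq : j ≤ q := by
      by_contra h
      push_neg at h
      have h2 := hrev j hjlen
      rw [if_neg (by omega)] at h2
      exact hdj h2
    have hap : a.getD p 0 = b.getD (p + q - p) 0 := by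
      have h := hrev p (by omega)
      rwa [if_pos ⟨le_refl _, by omega⟩] at h
    have haq : a.getD q 0 = b.getD (p + q - q) 0 := by
      have h := hrev q (by omega)
      rwa [if_pos ⟨by omega, le_refl _⟩] at h
    rw [show p + q - p = q from by omega] at hap
    rw [show p + q - q = p from by omega] at haq
    by_cases hp : a.getD p 0 = b.getD p 0
    · have hq' : a.getD q 0 = b.getD q 0 := by
        rw [haq, ← hp, hap]
      have hpi' : p < i := by
        rcases eq_or_lt_of_le hpi with he | hlt
        · exact absurd (he ▸ hp) hdi
        · exact hlt
      have hjq' : j < q := by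
        rcases eq_or_lt_of_le hjq with he | hlt
        · exact absurd (he.symm ▸ hq') hdj
        · exact hlt
      by_cases h2 : q = p + 2
      · exfalso
        have h3 := hrev (p + 1) (by omega)
        rw [if_pos ⟨by omega, by omega⟩, show p + q - (p + 1) = p + 1 from by omega] at h3
        have h4 : i = p + 1 := by omega
        exact hdi (h4 ▸ h3)
      · apply ih (p + 1) (q - 1) (by omega) (by omega) (by omega)
        intro k hk
        have hr := hrev k hk
        by_cases hcase : p + 1 ≤ k ∧ k ≤ q - 1
        · rw [if_pos hcase]
          rw [if_pos (by omega)] at hr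
          rw [show p + 1 + (q - 1) - k = p + q - k from by omega]
          exact hr
        · rw [if_neg hcase]
          by_cases hkp : k = p
          · rw [hkp]; exact hp
          · by_cases hkq : k = q
            · rw [hkq]; exact hq'
            · rw [if_neg (by omega)] at hr
              exact hr
    · have hip : i = p := by
        have : ¬ p < i := fun h => hp (hfd p h)
        omega
      have hbq : a.getD q 0 ≠ b.getD q 0 := by
        intro heq
        exact hp (by rw [hap, ← heq, haq])
      have hjq2 : j = q := by
        have : ¬ j < q := fun h => hbq (hld q h hq)
        omega
      intro k hk1 hk2
      have h := hrev k (by omega)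
      rw [if_pos ⟨by omega, by omega⟩] at h
      rw [hip, hjq2]
      exact h

-- for EQUAL arrays, a fix-point reversal exists iff b has an equal adjacent or gap-2 pair
lemma eq_case (a b : List Int) (hlen : b.length = a.length)
    (hab : ∀ k, k < a.length → a.getD k 0 = b.getD k 0) :
    (∃ p q, RevAt a b p q) ↔
      ((∃ k : Nat, k + 1 < a.length ∧ b.getD k 0 = b.getD (k + 1) 0) ∨
       (∃ k : Nat, k + 2 < a.length ∧ b.getD k 0 = b.getD (k + 2) 0)) := by
  constructor
  · rintro ⟨p, q, -, hpq, hq, hrev⟩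
    rcases Nat.even_or_odd (q - p) with ⟨t, ht⟩ | ⟨t, ht⟩
    · right
      have ht1 : 1 ≤ t := by omega
      refine ⟨p + t - 1, by omega, ?_⟩
      have h := hrev (p + t - 1) (by omega)
      rw [if_pos ⟨by omega, by omega⟩, show p + q - (p + t - 1) = (p + t - 1) + 2 from by omega] at h
      rw [← hab (p + t - 1) (by omega)]
      exact h
    · left
      refine ⟨p + t, by omega, ?_⟩
      have h := hrev (p + t) (by omega)
      rw [if_pos ⟨by omega, by omega⟩, show p + q - (p + t) = (p + t) + 1 from by omega] at h
      rw [← hab (p + t) (by omega)]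
      exact h
  · rintro (⟨k, hk, hbb⟩ | ⟨k, hk, hbb⟩)
    · refine ⟨k, k + 1, hlen, by omega, hk, ?_⟩
      intro k' hk'
      by_cases hw : k ≤ k' ∧ k' ≤ k + 1
      · rw [if_pos hw]
        have : k' = k ∨ k' = k + 1 := by omega
        rcases this with rfl | rfl
        · rw [show k' + (k' + 1) - k' = k' + 1 from by omega]
          rw [hab k' hk']
          exact hbb
        · rw [show k + (k + 1) - (k + 1) = k from by omega]
          rw [hab (k + 1) hk']
          exact hbb.symm
      · rw [if_neg hw]; exact hab k' hk'
    · refine ⟨k, k + 2, hlen, by omega, hk, ?_⟩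
      intro k' hk'
      by_cases hw : k ≤ k' ∧ k' ≤ k + 2
      · rw [if_pos hw]
        have : k' = k ∨ k' = k + 1 ∨ k' = k + 2 := by omega
        rcases this with rfl | rfl | rfl
        · rw [show k' + (k' + 2) - k' = k' + 2 from by omega]
          rw [hab k' hk']
          exact hbb
        · rw [show k + (k + 2) - (k + 1) = k + 1 from by omega]
          exact hab (k + 1) hk'
        · rw [show k + (k + 2) - (k + 2) = k from by omega]
          rw [hab (k + 2) hk']
          exact hbb.symm
      · rw [if_neg hw]; exact hab k' hk'

theorem are_they_equal_iff (a b : List Int) :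
    are_they_equal a b = true ↔ ∃ p q, RevAt a b p q := by
  unfold are_they_equal
  rw [aOuter_spec a b _ PySem.Set.empty (by intro x hx; simp [PySem.Set.empty] at hx)]
  constructor
  · rintro ⟨i, hi, j, hj, heq⟩
    rw [PySem.List.mem_pyRange_one] at hi hj
    have h0 : (0 : Int) ≤ i := hi.1
    have hlen : b.length = a.length := by
      have hl := congrArg List.length heq
      rwa [length_mkA2 b i j h0 (by omega)] at hl
    refine ⟨i.toNat, j.toNat, hlen, by omega, by omega, ?_⟩
    apply (mkA2_eq_iff a b i.toNat j.toNat (by omega) (by omega) hlen).1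
    rw [Int.toNat_of_nonneg h0, Int.toNat_of_nonneg (show (0 : Int) ≤ j from by omega)]
    exact heq
  · rintro ⟨p, q, hlen, hpq, hq, hrev⟩
    refine ⟨(p : Int), ?_, (q : Int), ?_, ?_⟩
    · rw [PySem.List.mem_pyRange_one]; omega
    · rw [PySem.List.mem_pyRange_one]; omega
    · exact (mkA2_eq_iff a b p q hpq hq hlen).2 hrev

theorem are_they_equal_alt_iff (a b : List Int) :
    are_they_equal_alt a b = true ↔ ∃ p q, RevAt a b p q := by
  have hbody : are_they_equal_alt a b =
      (if a.length ≠ b.length then false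
       else
        if bFirst a b (a.length : Int) 0 = (a.length : Int) then
          ((PySem.List.pyRange 0 ((a.length : Int) - 1) 1).any fun k =>
              PySem.List.pyGetD b k 0 == PySem.List.pyGetD b (k + 1) 0) ||
          ((PySem.List.pyRange 0 ((a.length : Int) - 2) 1).any fun k =>
              PySem.List.pyGetD b k 0 == PySem.List.pyGetD b (k + 2) 0)
        else
          decide (PySem.List.slice a (some (bFirst a b (a.length : Int) 0))
              (some (bLast a b ((a.length : Int) - 1) + 1)) =
            (PySem.List.slice b (some (bFirst a b (a.length : Int) 0))
              (some (bLast a b ((a.length : Int) - 1) + 1))).reverse)) := rfl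
  rw [hbody]
  by_cases hlen : a.length = b.length
  case neg =>
    rw [if_pos hlen]
    constructor
    · intro h; exact absurd h (by simp)
    · rintro ⟨p, q, hl, -⟩; exact absurd hl.symm hlen
  case pos =>
    rw [if_neg (fun h => h hlen)]
    obtain ⟨hf1, hf2, hf3, hf4⟩ :=
      bFirst_spec a b (a.length : Int) ((a.length : Int) - 0).toNat 0 (le_refl _)
        (le_refl 0) (Int.natCast_nonneg _)
    by_cases hfn : bFirst a b (a.length : Int) 0 = (a.length : Int)
    · rw [if_pos hfn]
      have hab : ∀ k : Nat, k < a.length → a.getD k 0 = b.getD k 0 := by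
        intro k hk
        have h := hf3 (k : Int) (Int.natCast_nonneg _) (by omega)
        rw [pyget_eq a _ (Int.natCast_nonneg _), pyget_eq b _ (Int.natCast_nonneg _)] at h
        simpa using h
      rw [eq_case a b hlen.symm hab]
      rw [Bool.or_eq_true, List.any_eq_true, List.any_eq_true]
      constructor
      · rintro (⟨k, hk, he⟩ | ⟨k, hk, he⟩)
        · rw [PySem.List.mem_pyRange_one] at hk
          rw [beq_iff_eq, pyget_eq b _ (by omega), pyget_eq b _ (by omega)] at he
          rw [show (k + 1).toNat = k.toNat + 1 from by omega] at he
          exact Or.inl ⟨k.toNat, by omega, he⟩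
        · rw [PySem.List.mem_pyRange_one] at hk
          rw [beq_iff_eq, pyget_eq b _ (by omega), pyget_eq b _ (by omega)] at he
          rw [show (k + 2).toNat = k.toNat + 2 from by omega] at he
          exact Or.inr ⟨k.toNat, by omega, he⟩
      · rintro (⟨k, hk, he⟩ | ⟨k, hk, he⟩)
        · refine Or.inl ⟨(k : Int), ?_, ?_⟩
          · rw [PySem.List.mem_pyRange_one]; omega
          · rw [beq_iff_eq, pyget_eq b _ (Int.natCast_nonneg _), pyget_eq b _ (by omega)]
            rw [show ((k : Int) + 1).toNat = k + 1 from by omega, Int.toNat_natCast]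
            exact he
        · refine Or.inr ⟨(k : Int), ?_, ?_⟩
          · rw [PySem.List.mem_pyRange_one]; omega
          · rw [beq_iff_eq, pyget_eq b _ (Int.natCast_nonneg _), pyget_eq b _ (by omega)]
            rw [show ((k : Int) + 2).toNat = k + 2 from by omega, Int.toNat_natCast]
            exact he
    · rw [if_neg hfn, decide_eq_true_eq]
      have hflt : bFirst a b (a.length : Int) 0 < (a.length : Int) := lt_of_le_of_ne hf2 hfn
      have hfd : PySem.List.pyGetD a (bFirst a b (a.length : Int) 0) 0
          ≠ PySem.List.pyGetD b (bFirst a b (a.length : Int) 0) 0 := by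
        rcases hf4 with h | h
        · exact absurd h hfn
        · exact h
      obtain ⟨hl0, hl1, hl2, hl3⟩ :=
        bLast_spec a b (((a.length : Int) - 1) + 1).toNat ((a.length : Int) - 1) (le_refl _)
          ⟨bFirst a b (a.length : Int) 0, hf1, by omega, hfd⟩
      have hFL : bFirst a b (a.length : Int) 0 ≤ bLast a b ((a.length : Int) - 1) := by
        by_contra hx
        push_neg at hx
        exact hfd (hl3 _ hx (by omega))
      have hcF : ((((bFirst a b (a.length : Int) 0).toNat : Nat)) : Int)
          = bFirst a b (a.length : Int) 0 := Int.toNat_of_nonneg hf1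
      have hcL : ((((bLast a b ((a.length : Int) - 1)).toNat : Nat)) : Int)
          = bLast a b ((a.length : Int) - 1) := Int.toNat_of_nonneg hl0
      rw [← hcF, ← hcL]
      rw [slice_rev_iff a b _ _ hlen.symm (by omega) (by omega)]
      have hpre : ∀ m : Nat, m < (bFirst a b (a.length : Int) 0).toNat →
          a.getD m 0 = b.getD m 0 := by
        intro m hm
        have h := hf3 (m : Int) (Int.natCast_nonneg _) (by omega)
        rw [pyget_eq a _ (Int.natCast_nonneg _), pyget_eq b _ (Int.natCast_nonneg _)] at h
        simpa using h
      have hsuf : ∀ m : Nat, (bLast a b ((a.length : Int) - 1)).toNat < m → m < a.length →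
          a.getD m 0 = b.getD m 0 := by
        intro m hm1 hm2
        have h := hl3 (m : Int) (by omega) (by omega)
        rw [pyget_eq a _ (Int.natCast_nonneg _), pyget_eq b _ (Int.natCast_nonneg _)] at h
        simpa using h
      have hdp : a.getD (bFirst a b (a.length : Int) 0).toNat 0
          ≠ b.getD (bFirst a b (a.length : Int) 0).toNat 0 := by
        rw [← pyget_eq a _ hf1, ← pyget_eq b _ hf1]
        exact hfd
      have hdq : a.getD (bLast a b ((a.length : Int) - 1)).toNat 0
          ≠ b.getD (bLast a b ((a.length : Int) - 1)).toNat 0 := by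
        rw [← pyget_eq a _ hl0, ← pyget_eq b _ hl0]
        exact hl2
      constructor
      · intro hpt
        have hpq : (bFirst a b (a.length : Int) 0).toNat
            < (bLast a b ((a.length : Int) - 1)).toNat := by
          have hple : (bFirst a b (a.length : Int) 0).toNat
              ≤ (bLast a b ((a.length : Int) - 1)).toNat := by omega
          rcases eq_or_lt_of_le hple with he | hlt
          · exfalso
            have h := hpt (bFirst a b (a.length : Int) 0).toNat (le_refl _) (by omega)
            rw [show (bFirst a b (a.length : Int) 0).toNat
                  + (bLast a b ((a.length : Int) - 1)).toNat
                  - (bFirst a b (a.length : Int) 0).toNat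
                = (bFirst a b (a.length : Int) 0).toNat from by omega] at h
            exact hdp h
          · exact hlt
        refine ⟨(bFirst a b (a.length : Int) 0).toNat,
          (bLast a b ((a.length : Int) - 1)).toNat, hlen.symm, hpq, by omega, ?_⟩
        intro k hk
        by_cases hw : (bFirst a b (a.length : Int) 0).toNat ≤ k
            ∧ k ≤ (bLast a b ((a.length : Int) - 1)).toNat
        · rw [if_pos hw]; exact hpt k hw.1 hw.2
        · rw [if_neg hw]
          rcases (by omega : k < (bFirst a b (a.length : Int) 0).toNat
              ∨ (bLast a b ((a.length : Int) - 1)).toNat < k) with h | h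
          · exact hpre k h
          · exact hsuf k h hk
      · rintro ⟨p', q', -, hpq', hq', hrev'⟩
        exact core a b _ _ (by omega) (by omega) hpre hdp hsuf hdq
          (q' - p') p' q' (le_refl _) hpq' hq' hrev'

-- ===== VERDICT (by name: the statement is the Claim_ definition above) =====
theorem are_they_equal_spec : Claim_equal_are_they_equal := by
  intro a b _
  unfold Spec_are_they_equal
  rcases h : are_they_equal_alt a b with _ | _
  · rcases h2 : are_they_equal a b with _ | _
    · rfl
    · exact absurd ((are_they_equal_alt_iff a b).2 ((are_they_equal_iff a b).1 h2)) (by simp [h])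
  · exact (are_they_equal_iff a b).2 ((are_they_equal_alt_iff a b).1 h)
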